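-- pv_equiv track=rewrite | github.com/danieleschmidt/ai-hardware-codesign-playground | backend/codesign_playground/research/research_discovery.py | _create_research_timeline
-- ===== SOURCE A (Python) =====
-- from typing import Dict, List, Any, Optional, Tuple, Set
--
-- def _create_research_timeline(opportunities: List[Dict[str, Any]]) -> Dict[str, List[str]]:
--     """Create research timeline."""
--     timeline = {
--         "Year 1": [],
--         "Year 2-3": [],
--         "Year 4-5": []
--     }
--
--     for opp in opportunities:
--         timeline_key = opp.get("timeline", "Medium-term (2-3 years)")
--
--         if "short" in timeline_key.lower():
--             timeline["Year 1"].append(opp["description"])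
--         elif "medium" in timeline_key.lower():
--             timeline["Year 2-3"].append(opp["description"])
--         else:
--             timeline["Year 4-5"].append(opp["description"])
--
--     return timeline
-- ===== SOURCE B (Python) =====
-- def _create_research_timeline(opportunities):
--     """Create research timeline (three filtered comprehensions instead of one loop)."""
--     def tl(opp):
--         return opp.get("timeline", "Medium-term (2-3 years)").lower()
--     return {
--         "Year 1": [o["description"] for o in opportunities if "short" in tl(o)],
--         "Year 2-3": [o["description"] for o in opportunities
--                      if "short" not in tl(o) and "medium" in tl(o)],
--         "Year 4-5": [o["description"] for o in opportunities
--                      if "short" not in tl(o) and "medium" not in tl(o)],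
--     }
-- ===== Notes on version B (the rewrite author's own statement) =====
-- stated objective: idiomatic
-- what changed: One if/elif/else loop mutating three dict buckets is replaced by three independent filtered comprehensions (medium/else buckets stated as explicit negations of the earlier tests), assembled directly into the returned dict.
-- outside the precondition, e.g. on _create_research_timeline([{'timeline': 'short'}]): A raises KeyError, B raises KeyError
import Mathlib
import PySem

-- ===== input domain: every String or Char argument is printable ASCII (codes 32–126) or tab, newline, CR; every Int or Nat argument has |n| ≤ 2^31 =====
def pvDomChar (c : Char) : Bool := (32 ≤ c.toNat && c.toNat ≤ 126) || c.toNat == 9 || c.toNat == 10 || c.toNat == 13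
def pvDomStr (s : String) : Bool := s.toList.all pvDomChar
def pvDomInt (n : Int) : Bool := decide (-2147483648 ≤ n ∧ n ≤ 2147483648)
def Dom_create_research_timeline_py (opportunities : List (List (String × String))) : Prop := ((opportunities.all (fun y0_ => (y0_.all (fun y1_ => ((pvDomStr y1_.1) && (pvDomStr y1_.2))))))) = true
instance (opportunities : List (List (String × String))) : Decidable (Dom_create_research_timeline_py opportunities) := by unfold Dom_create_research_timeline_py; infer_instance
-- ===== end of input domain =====

-- B replaces A's single if/elif/else loop over mutable buckets by three independent
-- filtered passes (idiomatic comprehensions); same O(n) cost.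


-- dict.get(k, dflt): first-match lookup in the association list (convention: lookup = first match)
def pvGetD (opp : List (String × String)) (k dflt : String) : String :=
  match opp.find? (fun p => p.1 == k) with
  | some p => p.2
  | none => dflt

-- ===== PORT A =====
-- A's dict `timeline` has three fixed keys, carried here as a triple of buckets;
-- opp["description"] is total under Pre_ (KeyError inputs are excluded), ported as pvGetD with default "".
def timelineStepA (acc : List String × List String × List String) (opp : List (String × String)) :
    List String × List String × List String :=
  let timeline_key := pvGetD opp "timeline" "Medium-term (2-3 years)"
  if PySem.Str.isIn "short" (PySem.Str.lower timeline_key) then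
    (acc.1 ++ [pvGetD opp "description" ""], acc.2.1, acc.2.2)
  else if PySem.Str.isIn "medium" (PySem.Str.lower timeline_key) then
    (acc.1, acc.2.1 ++ [pvGetD opp "description" ""], acc.2.2)
  else
    (acc.1, acc.2.1, acc.2.2 ++ [pvGetD opp "description" ""])

def create_research_timeline_py (opportunities : List (List (String × String))) : List (String × List String) :=
  let t := opportunities.foldl timelineStepA ([], [], [])
  [("Year 1", t.1), ("Year 2-3", t.2.1), ("Year 4-5", t.2.2)]

-- ===== PORT B =====
def bTl (opp : List (String × String)) : String :=
  PySem.Str.lower (pvGetD opp "timeline" "Medium-term (2-3 years)")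

def bDesc (opp : List (String × String)) : String := pvGetD opp "description" ""

def create_research_timeline_py_alt (opportunities : List (List (String × String))) : List (String × List String) :=
  [("Year 1",
     (opportunities.filter (fun o => PySem.Str.isIn "short" (bTl o))).map bDesc),
   ("Year 2-3",
     (opportunities.filter (fun o => !PySem.Str.isIn "short" (bTl o) && PySem.Str.isIn "medium" (bTl o))).map bDesc),
   ("Year 4-5",
     (opportunities.filter (fun o => !PySem.Str.isIn "short" (bTl o) && !PySem.Str.isIn "medium" (bTl o))).map bDesc)]

-- ===== PRECONDITION & SPEC =====
-- Pre_ excludes exactly the inputs where A (and B) raise KeyError: some opportunity without a "description" key.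
def Pre_create_research_timeline_py (opportunities : List (List (String × String))) : Prop :=
  (opportunities.all (fun opp => opp.any (fun p => p.1 == "description"))) = true
instance (opportunities : List (List (String × String))) : Decidable (Pre_create_research_timeline_py opportunities) := by unfold Pre_create_research_timeline_py; infer_instance

def pvWitness_create_research_timeline_py : (List (List (String × String))) :=
  [[("timeline", "Short-term"), ("description", "a")], [("description", "b")]]

def Spec_create_research_timeline_py (opportunities : List (List (String × String))) (out : List (String × List String)) : Prop := out = create_research_timeline_py_alt opportunities
instance (opportunities : List (List (String × String))) (out : List (String × List String)) : Decidable (Spec_create_research_timeline_py opportunities out) := by unfold Spec_create_research_timeline_py; infer_instance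

-- ===== CLAIM (what is proved, stated in full; the proofs are below) =====
def Claim_equal_create_research_timeline_py : Prop := ∀ (opportunities : List (List (String × String))), Dom_create_research_timeline_py opportunities → Pre_create_research_timeline_py opportunities → Spec_create_research_timeline_py opportunities (create_research_timeline_py opportunities)

-- ===== LEMMAS AND PROOFS =====
theorem foldl_timelineStepA (opps : List (List (String × String)))
    (y1 y2 y3 : List String) :
    opps.foldl timelineStepA (y1, y2, y3) =
      (y1 ++ (opps.filter (fun o => PySem.Str.isIn "short" (bTl o))).map bDesc,
       y2 ++ (opps.filter (fun o => !PySem.Str.isIn "short" (bTl o) && PySem.Str.isIn "medium" (bTl o))).map bDesc,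
       y3 ++ (opps.filter (fun o => !PySem.Str.isIn "short" (bTl o) && !PySem.Str.isIn "medium" (bTl o))).map bDesc) := by
  induction opps generalizing y1 y2 y3 with
  | nil => simp
  | cons o rest ih =>
    simp only [List.foldl_cons, timelineStepA]
    split_ifs with h1 h2 <;>
      simp_all [bTl, bDesc]

theorem create_research_timeline_py_spec' :
    ∀ opps, create_research_timeline_py opps = create_research_timeline_py_alt opps := by
  intro opps
  simp [create_research_timeline_py, create_research_timeline_py_alt,
    foldl_timelineStepA opps [] [] []]

-- ===== VERDICT (by name: the statement is the Claim_ definition above) =====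
theorem create_research_timeline_py_spec : Claim_equal_create_research_timeline_py := by
  intro opps _ _
  exact create_research_timeline_py_spec' opps
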